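-- pv_equiv track=rewrite | github.com/Farfive/production | backend/app/services/smart_matching.py | _are_countries_in_same_region
-- ===== SOURCE A (Python) =====
-- from typing import List, Dict, Any, Optional, Tuple
--
-- def _are_countries_in_same_region(country1: str, countries2: List[str]) -> bool:
--     """Check if countries are in the same geographic region."""
--     # Simplified regional grouping
--     regions = {
--         'north_america': ['US', 'CA', 'MX'],
--         'europe': ['DE', 'FR', 'UK', 'IT', 'ES', 'NL', 'BE'],
--         'asia_pacific': ['CN', 'JP', 'KR', 'IN', 'AU', 'SG'],
--     }
--
--     for region, countries in regions.items():
--         if country1 in countries and any(c in countries for c in countries2):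
--             return True
--
--     return False
-- ===== SOURCE B (Python) =====
-- from typing import List
--
-- _REGIONS = {
--     'north_america': ['US', 'CA', 'MX'],
--     'europe': ['DE', 'FR', 'UK', 'IT', 'ES', 'NL', 'BE'],
--     'asia_pacific': ['CN', 'JP', 'KR', 'IN', 'AU', 'SG'],
-- }
--
-- # Inverted index built once: country code -> region name.
-- _COUNTRY_TO_REGION = {c: region for region, cs in _REGIONS.items() for c in cs}
--
-- def _are_countries_in_same_region(country1: str, countries2: List[str]) -> bool:
--     region1 = _COUNTRY_TO_REGION.get(country1)
--     if region1 is None: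
--         return False
--     return any(_COUNTRY_TO_REGION.get(c) == region1 for c in countries2)
-- ===== Notes on version B (the rewrite author's own statement) =====
-- stated objective: idiomatic
-- what changed: Replaces the loop over regions with inner list scans by a precomputed inverted dict country->region; the function looks up country1's region once and scans countries2 with O(1) lookups.
import Mathlib
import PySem

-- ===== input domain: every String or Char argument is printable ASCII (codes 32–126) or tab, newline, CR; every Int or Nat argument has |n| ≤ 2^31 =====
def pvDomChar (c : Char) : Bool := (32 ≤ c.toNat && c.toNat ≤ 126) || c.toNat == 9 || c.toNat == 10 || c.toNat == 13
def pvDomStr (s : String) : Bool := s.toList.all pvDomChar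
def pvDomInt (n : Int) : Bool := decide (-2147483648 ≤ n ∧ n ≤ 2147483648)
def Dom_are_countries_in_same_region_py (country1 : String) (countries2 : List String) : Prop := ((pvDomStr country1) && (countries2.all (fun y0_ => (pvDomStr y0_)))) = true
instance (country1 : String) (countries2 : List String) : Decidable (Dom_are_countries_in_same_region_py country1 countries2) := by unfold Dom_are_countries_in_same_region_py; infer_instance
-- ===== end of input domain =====

-- B replaces A's loop over regions (with inner list scans) by a precomputed inverted
-- dict country -> region and a single scan of countries2; same return value everywhere.

-- ===== PORT A =====
-- the `regions` dict literal built at the top of A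
def pvRegionsDict : PySem.Dict String (List String) :=
  PySem.Dict.ofList [("north_america", ["US", "CA", "MX"]),
    ("europe", ["DE", "FR", "UK", "IT", "ES", "NL", "BE"]),
    ("asia_pacific", ["CN", "JP", "KR", "IN", "AU", "SG"])]

-- the `for region, countries in regions.items()` loop with its early `return True`
def pvALoop (country1 : String) (countries2 : List String) :
    List (String × List String) → Bool
  | [] => false
  | (_, countries) :: rest =>
    if countries.contains country1 && countries2.any (fun c => countries.contains c) then true
    else pvALoop country1 countries2 rest

def are_countries_in_same_region_py (country1 : String) (countries2 : List String) : Bool :=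
  pvALoop country1 countries2 pvRegionsDict.items

-- ===== PORT B =====
-- _COUNTRY_TO_REGION = {c: region for region, cs in _REGIONS.items() for c in cs}
def pvCountryToRegion : PySem.Dict String String :=
  pvRegionsDict.items.foldl
    (fun d p => p.2.foldl (fun d c => d.insert c p.1) d) PySem.Dict.empty

def are_countries_in_same_region_py_alt (country1 : String) (countries2 : List String) : Bool :=
  match pvCountryToRegion.get? country1 with
  | none => false
  | some region1 => countries2.any (fun c => pvCountryToRegion.get? c == some region1)

-- ===== PRECONDITION & SPEC =====
def Spec_are_countries_in_same_region_py (country1 : String) (countries2 : List String) (out : Bool) : Prop := out = are_countries_in_same_region_py_alt country1 countries2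
instance (country1 : String) (countries2 : List String) (out : Bool) : Decidable (Spec_are_countries_in_same_region_py country1 countries2 out) := by unfold Spec_are_countries_in_same_region_py; infer_instance

-- ===== CLAIM (what is proved, stated in full; the proofs are below) =====
def Claim_equal_are_countries_in_same_region_py : Prop := ∀ (country1 : String) (countries2 : List String), Dom_are_countries_in_same_region_py country1 countries2 → Spec_are_countries_in_same_region_py country1 countries2 (are_countries_in_same_region_py country1 countries2)

-- ===== LEMMAS AND PROOFS =====

lemma pvItems_lit : pvRegionsDict.items =
    [("north_america", ["US", "CA", "MX"]),
     ("europe", ["DE", "FR", "UK", "IT", "ES", "NL", "BE"]),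
     ("asia_pacific", ["CN", "JP", "KR", "IN", "AU", "SG"])] := by decide

lemma pvCtr_lit : pvCountryToRegion = PySem.Dict.mk
    [("US","north_america"),("CA","north_america"),("MX","north_america"),
     ("DE","europe"),("FR","europe"),("UK","europe"),("IT","europe"),("ES","europe"),("NL","europe"),("BE","europe"),
     ("CN","asia_pacific"),("JP","asia_pacific"),("KR","asia_pacific"),("IN","asia_pacific"),("AU","asia_pacific"),("SG","asia_pacific")] := by
  decide

set_option maxHeartbeats 1000000 in
lemma pvGet_char (c : String) : pvCountryToRegion.get? c =
    if c = "US" ∨ c = "CA" ∨ c = "MX" then some "north_america"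
    else if c = "DE" ∨ c = "FR" ∨ c = "UK" ∨ c = "IT" ∨ c = "ES" ∨ c = "NL" ∨ c = "BE" then some "europe"
    else if c = "CN" ∨ c = "JP" ∨ c = "KR" ∨ c = "IN" ∨ c = "AU" ∨ c = "SG" then some "asia_pacific"
    else none := by
  rw [pvCtr_lit]
  by_cases h0 : c = "US"
  · subst h0; rfl
  by_cases h1 : c = "CA"
  · subst h1; rfl
  by_cases h2 : c = "MX"
  · subst h2; rfl
  by_cases h3 : c = "DE"
  · subst h3; rfl
  by_cases h4 : c = "FR"
  · subst h4; rfl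
  by_cases h5 : c = "UK"
  · subst h5; rfl
  by_cases h6 : c = "IT"
  · subst h6; rfl
  by_cases h7 : c = "ES"
  · subst h7; rfl
  by_cases h8 : c = "NL"
  · subst h8; rfl
  by_cases h9 : c = "BE"
  · subst h9; rfl
  by_cases h10 : c = "CN"
  · subst h10; rfl
  by_cases h11 : c = "JP"
  · subst h11; rfl
  by_cases h12 : c = "KR"
  · subst h12; rfl
  by_cases h13 : c = "IN"
  · subst h13; rfl
  by_cases h14 : c = "AU"
  · subst h14; rfl
  by_cases h15 : c = "SG"
  · subst h15; rfl
  simp [PySem.Dict.get?, beq_iff_eq, h0, Ne.symm h0, h1, Ne.symm h1, h2, Ne.symm h2, h3, Ne.symm h3, h4, Ne.symm h4, h5, Ne.symm h5, h6, Ne.symm h6, h7, Ne.symm h7, h8, Ne.symm h8, h9, Ne.symm h9, h10, Ne.symm h10, h11, Ne.symm h11, h12, Ne.symm h12, h13, Ne.symm h13, h14, Ne.symm h14, h15, Ne.symm h15]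

lemma pvElemNA (c : String) : ((["US", "CA", "MX"] : List String).contains c) =
    (pvCountryToRegion.get? c == some "north_america") := by
  rw [pvGet_char c]
  by_cases h1 : c = "US" ∨ c = "CA" ∨ c = "MX"
  · rcases h1 with h | h | h <;> subst h <;> decide
  · by_cases h2 : c = "DE" ∨ c = "FR" ∨ c = "UK" ∨ c = "IT" ∨ c = "ES" ∨ c = "NL" ∨ c = "BE"
    · rcases h2 with h | h | h | h | h | h | h <;> subst h <;> decide
    · by_cases h3 : c = "CN" ∨ c = "JP" ∨ c = "KR" ∨ c = "IN" ∨ c = "AU" ∨ c = "SG"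
      · rcases h3 with h | h | h | h | h | h <;> subst h <;> decide
      · rw [if_neg h1, if_neg h2, if_neg h3]
        push_neg at h1
        simp [h1.1, h1.2.1, h1.2.2]

lemma pvElemEU (c : String) : ((["DE", "FR", "UK", "IT", "ES", "NL", "BE"] : List String).contains c) =
    (pvCountryToRegion.get? c == some "europe") := by
  rw [pvGet_char c]
  by_cases h1 : c = "US" ∨ c = "CA" ∨ c = "MX"
  · rcases h1 with h | h | h <;> subst h <;> decide
  · by_cases h2 : c = "DE" ∨ c = "FR" ∨ c = "UK" ∨ c = "IT" ∨ c = "ES" ∨ c = "NL" ∨ c = "BE"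
    · rcases h2 with h | h | h | h | h | h | h <;> subst h <;> decide
    · by_cases h3 : c = "CN" ∨ c = "JP" ∨ c = "KR" ∨ c = "IN" ∨ c = "AU" ∨ c = "SG"
      · rcases h3 with h | h | h | h | h | h <;> subst h <;> decide
      · rw [if_neg h1, if_neg h2, if_neg h3]
        push_neg at h2
        simp [h2.1, h2.2.1, h2.2.2.1, h2.2.2.2.1, h2.2.2.2.2.1, h2.2.2.2.2.2.1, h2.2.2.2.2.2.2]

lemma pvElemAP (c : String) : ((["CN", "JP", "KR", "IN", "AU", "SG"] : List String).contains c) =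
    (pvCountryToRegion.get? c == some "asia_pacific") := by
  rw [pvGet_char c]
  by_cases h1 : c = "US" ∨ c = "CA" ∨ c = "MX"
  · rcases h1 with h | h | h <;> subst h <;> decide
  · by_cases h2 : c = "DE" ∨ c = "FR" ∨ c = "UK" ∨ c = "IT" ∨ c = "ES" ∨ c = "NL" ∨ c = "BE"
    · rcases h2 with h | h | h | h | h | h | h <;> subst h <;> decide
    · by_cases h3 : c = "CN" ∨ c = "JP" ∨ c = "KR" ∨ c = "IN" ∨ c = "AU" ∨ c = "SG"
      · rcases h3 with h | h | h | h | h | h <;> subst h <;> decide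
      · rw [if_neg h1, if_neg h2, if_neg h3]
        push_neg at h3
        simp [h3.1, h3.2.1, h3.2.2.1, h3.2.2.2.1, h3.2.2.2.2.1, h3.2.2.2.2.2]
lemma pvA_eq (c1 : String) (cs2 : List String) :
    are_countries_in_same_region_py c1 cs2 =
      (((["US", "CA", "MX"] : List String).contains c1 && cs2.any (fun c => (["US", "CA", "MX"] : List String).contains c)) ||
       (((["DE", "FR", "UK", "IT", "ES", "NL", "BE"] : List String).contains c1 && cs2.any (fun c => (["DE", "FR", "UK", "IT", "ES", "NL", "BE"] : List String).contains c)) ||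
        ((["CN", "JP", "KR", "IN", "AU", "SG"] : List String).contains c1 && cs2.any (fun c => (["CN", "JP", "KR", "IN", "AU", "SG"] : List String).contains c)))) := by
  unfold are_countries_in_same_region_py
  rw [pvItems_lit]
  simp only [pvALoop, Bool.if_true_left, Bool.or_false, Bool.decide_eq_true]

lemma pvMain (c1 : String) (cs2 : List String) :
    are_countries_in_same_region_py c1 cs2 = are_countries_in_same_region_py_alt c1 cs2 := by
  rw [pvA_eq]
  unfold are_countries_in_same_region_py_alt
  rw [pvGet_char c1]
  by_cases hNA : c1 = "US" ∨ c1 = "CA" ∨ c1 = "MX"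
  · rw [if_pos hNA]
    have t1 : (["US", "CA", "MX"] : List String).contains c1 = true := by rcases hNA with h | h | h <;> simp [h]
    have t2 : (["DE", "FR", "UK", "IT", "ES", "NL", "BE"] : List String).contains c1 = false := by rcases hNA with h | h | h <;> simp [h]
    have t3 : (["CN", "JP", "KR", "IN", "AU", "SG"] : List String).contains c1 = false := by rcases hNA with h | h | h <;> simp [h]
    rw [t1, t2, t3]
    simp only [Bool.true_and, Bool.false_and, Bool.or_false, pvElemNA]
  · rw [if_neg hNA]
    by_cases hEU : c1 = "DE" ∨ c1 = "FR" ∨ c1 = "UK" ∨ c1 = "IT" ∨ c1 = "ES" ∨ c1 = "NL" ∨ c1 = "BE"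
    · rw [if_pos hEU]
      have t1 : (["US", "CA", "MX"] : List String).contains c1 = false := by
        rcases hEU with h | h | h | h | h | h | h <;> simp [h]
      have t2 : (["DE", "FR", "UK", "IT", "ES", "NL", "BE"] : List String).contains c1 = true := by
        rcases hEU with h | h | h | h | h | h | h <;> simp [h]
      have t3 : (["CN", "JP", "KR", "IN", "AU", "SG"] : List String).contains c1 = false := by
        rcases hEU with h | h | h | h | h | h | h <;> simp [h]
      rw [t1, t2, t3]
      simp only [Bool.true_and, Bool.false_and, Bool.or_false, Bool.false_or, pvElemEU]
    · rw [if_neg hEU]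
      by_cases hAP : c1 = "CN" ∨ c1 = "JP" ∨ c1 = "KR" ∨ c1 = "IN" ∨ c1 = "AU" ∨ c1 = "SG"
      · rw [if_pos hAP]
        have t1 : (["US", "CA", "MX"] : List String).contains c1 = false := by
          rcases hAP with h | h | h | h | h | h <;> simp [h]
        have t2 : (["DE", "FR", "UK", "IT", "ES", "NL", "BE"] : List String).contains c1 = false := by
          rcases hAP with h | h | h | h | h | h <;> simp [h]
        have t3 : (["CN", "JP", "KR", "IN", "AU", "SG"] : List String).contains c1 = true := by
          rcases hAP with h | h | h | h | h | h <;> simp [h]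
        rw [t1, t2, t3]
        simp only [Bool.true_and, Bool.false_and, Bool.false_or, pvElemAP]
      · rw [if_neg hAP]
        push_neg at hNA hEU hAP
        obtain ⟨n1, n2, n3⟩ := hNA
        obtain ⟨e1, e2, e3, e4, e5, e6, e7⟩ := hEU
        obtain ⟨a1, a2, a3, a4, a5, a6⟩ := hAP
        have t1 : (["US", "CA", "MX"] : List String).contains c1 = false := by simp [n1, n2, n3]
        have t2 : (["DE", "FR", "UK", "IT", "ES", "NL", "BE"] : List String).contains c1 = false := by simp [e1, e2, e3, e4, e5, e6, e7]
        have t3 : (["CN", "JP", "KR", "IN", "AU", "SG"] : List String).contains c1 = false := by simp [a1, a2, a3, a4, a5, a6]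
        rw [t1, t2, t3]
        simp only [Bool.false_and, Bool.or_false]

-- ===== VERDICT (by name: the statement is the Claim_ definition above) =====
theorem are_countries_in_same_region_py_spec : Claim_equal_are_countries_in_same_region_py := by
  intro c1 cs2 _
  exact pvMain c1 cs2
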